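-- pv_equiv track=rewrite | github.com/cohajunwa/HooHacks25-Network-Visualization | calc_render.py | calculate_grid_positions
-- ===== SOURCE A (Python) =====
-- import math
--
-- def calculate_grid_positions(graph_dict, G = None):
--     """Dynamically spaces out nodes in a grid layout."""
--     num_nodes = len(graph_dict)
--     if num_nodes == 0:
--         return {}
--
--     grid_size = math.ceil(math.sqrt(num_nodes))  # Define grid dimensions
--     spacing_x, spacing_y = 300, 300  # Adjust for better spacing
--     start_x, start_y = 100, 100  # Start position
--
--     positions = {}
--     index = 0
--     for row in range(grid_size):
--         for col in range(grid_size):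
--             if index >= num_nodes:
--                 break  # Stop when all nodes are placed
--             node = list(graph_dict.keys())[index]
--             x = start_x + col * spacing_x
--             y = start_y + row * spacing_y
--             positions[node] = {"x": x, "y": y}
--             index += 1
--
--     return positions
-- ===== SOURCE B (Python) =====
-- import math
--
-- def calculate_grid_positions(graph_dict, G = None):
--     """Dynamically spaces out nodes in a grid layout (single pass, divmod)."""
--     n = len(graph_dict)
--     if n == 0:
--         return {}
--     g = math.isqrt(n - 1) + 1  # = ceil(sqrt(n)) for n >= 1, exactly
--     return {node: {"x": 100 + (i % g) * 300, "y": 100 + (i // g) * 300}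
--             for i, node in enumerate(graph_dict)}
-- ===== Notes on version B (the rewrite author's own statement) =====
-- stated objective: faster
-- what changed: A rebuilds list(graph_dict.keys()) inside the nested row/col loops to index each node; B iterates the dict once with enumerate and computes each node's row/col by divmod on its index (grid side via math.isqrt).
import Mathlib
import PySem

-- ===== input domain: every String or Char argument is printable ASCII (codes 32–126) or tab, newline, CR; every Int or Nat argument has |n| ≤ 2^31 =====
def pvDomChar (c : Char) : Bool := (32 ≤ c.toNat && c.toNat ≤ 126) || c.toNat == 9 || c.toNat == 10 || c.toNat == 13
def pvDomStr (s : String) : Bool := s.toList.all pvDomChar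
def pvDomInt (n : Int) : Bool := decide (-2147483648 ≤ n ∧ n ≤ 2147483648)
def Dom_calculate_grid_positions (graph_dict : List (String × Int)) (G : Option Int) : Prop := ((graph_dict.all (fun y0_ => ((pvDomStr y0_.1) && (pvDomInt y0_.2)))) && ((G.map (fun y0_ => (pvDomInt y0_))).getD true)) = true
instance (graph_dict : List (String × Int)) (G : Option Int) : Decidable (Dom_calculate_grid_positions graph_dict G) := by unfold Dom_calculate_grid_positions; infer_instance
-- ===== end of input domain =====

-- B replaces A's nested row/col loops (which rebuild list(graph_dict.keys()) at every cell) by one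
-- enumerate pass computing row/col by divmod; equality of the returned dict is proved below.

-- ===== PORT A =====
-- port of math.ceil(math.sqrt(n)) for a list length n (math.sqrt is correctly rounded, hence this
-- integer ceiling-sqrt is exact for every length reachable here)
def pyCeilSqrt (n : Nat) : Nat :=
  if Nat.sqrt n * Nat.sqrt n = n then Nat.sqrt n else Nat.sqrt n + 1

def calculate_grid_positions (graph_dict : List (String × Int)) (G : Option Int) : List (String × List (String × Int)) :=
  -- list(graph_dict.keys()): the dict's keys are the first occurrences, in order
  let keys := PySem.List.dedup (graph_dict.map (·.1))
  let num_nodes : Int := keys.length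
  if num_nodes = 0 then [] else
  let grid_size : Int := pyCeilSqrt keys.length
  let spacing_x : Int := 300
  let spacing_y : Int := 300
  let start_x : Int := 100
  let start_y : Int := 100
  -- 'break' leaves index unchanged and the guard stays true, so skipping the rest of the row is exact
  let st := (PySem.List.pyRange 0 grid_size 1).foldl (fun st row =>
    (PySem.List.pyRange 0 grid_size 1).foldl (fun (st : PySem.Dict String (List (String × Int)) × Int) col =>
      if num_nodes ≤ st.2 then st
      else
        let node := PySem.List.pyGetD keys st.2 ""
        let x := start_x + col * spacing_x
        let y := start_y + row * spacing_y
        (st.1.insert node [("x", x), ("y", y)], st.2 + 1)) st)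
    ((PySem.Dict.empty : PySem.Dict String (List (String × Int))), (0 : Int))
  st.1.items

-- ===== PORT B =====
def calculate_grid_positions_alt (graph_dict : List (String × Int)) (G : Option Int) : List (String × List (String × Int)) :=
  let keys := PySem.List.dedup (graph_dict.map (·.1))
  let n := keys.length
  if n = 0 then [] else
  let g : Int := Nat.sqrt (n - 1) + 1   -- math.isqrt(n-1) + 1
  (PySem.List.enumerate keys).map (fun p =>
    (p.2, [("x", 100 + PySem.Int.mod p.1 g * 300), ("y", 100 + PySem.Int.floordiv p.1 g * 300)]))

-- ===== PRECONDITION & SPEC =====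
def Spec_calculate_grid_positions (graph_dict : List (String × Int)) (G : Option Int) (out : List (String × List (String × Int))) : Prop := out = calculate_grid_positions_alt graph_dict G
instance (graph_dict : List (String × Int)) (G : Option Int) (out : List (String × List (String × Int))) : Decidable (Spec_calculate_grid_positions graph_dict G out) := by unfold Spec_calculate_grid_positions; infer_instance

-- ===== CLAIM (what is proved, stated in full; the proofs are below) =====
def Claim_equal_calculate_grid_positions : Prop := ∀ (graph_dict : List (String × Int)) (G : Option Int), Dom_calculate_grid_positions graph_dict G → Spec_calculate_grid_positions graph_dict G (calculate_grid_positions graph_dict G)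

-- ===== LEMMAS AND PROOFS =====

-- value stored for the node with flat index i, grid side g'
def gridVal (g' i : Nat) : List (String × Int) :=
  [("x", 100 + ((i % g' : Nat) : Int) * 300), ("y", 100 + ((i / g' : Nat) : Int) * 300)]

-- insert the nodes with flat indices l into D
def gridIns (keys : List String) (g' : Nat) (D : PySem.Dict String (List (String × Int))) (l : List Nat) : PySem.Dict String (List (String × Int)) :=
  l.foldl (fun d i => d.insert (keys.getD i "") (gridVal g' i)) D

lemma pyCeilSqrt_eq (n : Nat) (h : 1 ≤ n) : pyCeilSqrt n = Nat.sqrt (n - 1) + 1 := by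
  unfold pyCeilSqrt
  have hs : Nat.sqrt n * Nat.sqrt n ≤ n := Nat.sqrt_le n
  split_ifs with hsq
  · have hpos : 1 ≤ Nat.sqrt n := Nat.sqrt_pos.mpr h
    obtain ⟨t, ht⟩ : ∃ t, Nat.sqrt n = t + 1 := ⟨Nat.sqrt n - 1, by omega⟩
    have hn : t * t + 2 * t + 1 = n := by rw [← hsq, ht]; ring
    have h1 : t ≤ Nat.sqrt (n - 1) := by rw [Nat.le_sqrt]; omega
    have h2 : Nat.sqrt (n - 1) < t + 1 := by
      rw [Nat.sqrt_lt]
      have hx : (t + 1) * (t + 1) = t * t + 2 * t + 1 := by ring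
      omega
    omega
  · have h1 : Nat.sqrt n ≤ Nat.sqrt (n - 1) := by rw [Nat.le_sqrt]; omega
    have h2 : Nat.sqrt (n - 1) ≤ Nat.sqrt n := Nat.sqrt_le_sqrt (by omega)
    omega

lemma le_pyCeilSqrt_sq (n : Nat) : n ≤ pyCeilSqrt n * pyCeilSqrt n := by
  unfold pyCeilSqrt
  have hs2 : n < (Nat.sqrt n + 1) * (Nat.sqrt n + 1) := Nat.lt_succ_sqrt n
  split_ifs with hsq
  · omega
  · omega

lemma map_getD_range {α : Type} (xs : List α) (d : α) :
    (List.range xs.length).map (fun i => xs.getD i d) = xs := by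
  apply List.ext_getElem
  · simp
  · intro i h1 h2
    simp [List.getD_eq_getElem?_getD, List.getElem?_eq_getElem h2]

-- one row of A's loop: columns a..g'-1, state (dict, index); the index saturates at keys.length
lemma innerLem (keys : List String) (g' : Nat) :
    ∀ (cnt a r : Nat) (D : PySem.Dict String (List (String × Int))), a + cnt = g' →
    List.foldl (fun (st : PySem.Dict String (List (String × Int)) × Int) (c : Nat) =>
        if (keys.length : Int) ≤ st.2 then st
        else (st.1.insert (PySem.List.pyGetD keys st.2 "") [("x", 100 + (c : Int) * 300), ("y", 100 + (r : Int) * 300)], st.2 + 1))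
      (D, ((min keys.length (r * g' + a) : Nat) : Int)) (List.range' a cnt)
    = (gridIns keys g' D (List.range' (min keys.length (r * g' + a)) (min keys.length (r * g' + a + cnt) - min keys.length (r * g' + a))),
       ((min keys.length (r * g' + a + cnt) : Nat) : Int)) := by
  intro cnt
  induction cnt with
  | zero =>
    intro a r D _
    simp [gridIns]
  | succ cnt ih =>
    intro a r D hag
    set n := keys.length with hn
    rw [List.range'_succ, List.foldl_cons]
    dsimp only
    by_cases h : n ≤ r * g' + a
    · -- saturated: the guard skips; index stays n
      have hmin : min n (r * g' + a) = n := by omega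
      rw [hmin, if_pos (by exact_mod_cast le_refl n)]
      have := ih (a + 1) r D (by omega)
      have hmin1 : min n (r * g' + (a + 1)) = n := by omega
      rw [hmin1] at this
      rw [this]
      have e1 : min n (r * g' + (a + 1) + cnt) = min n (r * g' + a + (cnt + 1)) := by omega
      rw [e1]
    · -- running: process index m = r*g'+a at column a
      have hm : min n (r * g' + a) = r * g' + a := by omega
      have hg : a < g' := by omega
      rw [hm]
      rw [if_neg (by exact_mod_cast h : ¬ ((n : Int) ≤ ((r * g' + a : Nat) : Int)))]
      have hget : PySem.List.pyGetD keys ((r * g' + a : Nat) : Int) "" = keys.getD (r * g' + a) "" :=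
        PySem.List.pyGetD_natCast keys (r * g' + a) ""
      have hmod : (r * g' + a) % g' = a := by
        rw [mul_comm, Nat.mul_add_mod, Nat.mod_eq_of_lt hg]
      have hdiv : (r * g' + a) / g' = r := by
        rw [mul_comm, Nat.mul_add_div (by omega), Nat.div_eq_of_lt hg, Nat.add_zero]
      have hval : [(("x" : String), 100 + (a : Int) * 300), ("y", 100 + (r : Int) * 300)] = gridVal g' (r * g' + a) := by
        rw [gridVal, hmod, hdiv]
      rw [hget, hval]
      have hcast : ((r * g' + a : Nat) : Int) + 1 = ((r * g' + (a + 1) : Nat) : Int) := by push_cast; ring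
      rw [hcast]
      have hmin1 : min n (r * g' + (a + 1)) = r * g' + (a + 1) := by omega
      have hih := ih (a + 1) r (D.insert (keys.getD (r * g' + a) "") (gridVal g' (r * g' + a))) (by omega)
      rw [hmin1] at hih
      rw [hih]
      have e1 : min n (r * g' + (a + 1) + cnt) = min n (r * g' + a + (cnt + 1)) := by omega
      rw [e1]
      have hmM : r * g' + (a + 1) ≤ min n (r * g' + a + (cnt + 1)) := by omega
      have hrange : List.range' (r * g' + a) (min n (r * g' + a + (cnt + 1)) - (r * g' + a)) =
          (r * g' + a) :: List.range' (r * g' + (a + 1)) (min n (r * g' + a + (cnt + 1)) - (r * g' + (a + 1))) := by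
        have e2 : min n (r * g' + a + (cnt + 1)) - (r * g' + a) =
            (min n (r * g' + a + (cnt + 1)) - (r * g' + (a + 1))) + 1 := by omega
        rw [e2, List.range'_succ, Nat.add_assoc]
      rw [hrange]
      simp [gridIns]

lemma gridIns_append (keys : List String) (g' : Nat) (D : PySem.Dict String (List (String × Int))) (l1 l2 : List Nat) :
    gridIns keys g' D (l1 ++ l2) = gridIns keys g' (gridIns keys g' D l1) l2 := by
  simp [gridIns, List.foldl_append]

lemma range'_glue (m0 m1 M : Nat) (h01 : m0 ≤ m1) (h1M : m1 ≤ M) :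
    List.range' m0 (m1 - m0) ++ List.range' m1 (M - m1) = List.range' m0 (M - m0) := by
  have h := List.range'_append (s := m0) (m := m1 - m0) (n := M - m1) (step := 1)
  rw [Nat.one_mul, Nat.add_sub_cancel' h01] at h
  rw [h]
  congr 1
  omega

-- all of A's rows r..r+cnt-1
lemma outerLem (keys : List String) (g' : Nat) :
    ∀ (cnt r : Nat) (D : PySem.Dict String (List (String × Int))),
    List.foldl (fun (st : PySem.Dict String (List (String × Int)) × Int) (r0 : Nat) =>
        List.foldl (fun (st : PySem.Dict String (List (String × Int)) × Int) (c : Nat) =>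
          if (keys.length : Int) ≤ st.2 then st
          else (st.1.insert (PySem.List.pyGetD keys st.2 "") [("x", 100 + (c : Int) * 300), ("y", 100 + (r0 : Int) * 300)], st.2 + 1))
          st (List.range g'))
      (D, ((min keys.length (r * g') : Nat) : Int)) (List.range' r cnt)
    = (gridIns keys g' D (List.range' (min keys.length (r * g')) (min keys.length ((r + cnt) * g') - min keys.length (r * g'))),
       ((min keys.length ((r + cnt) * g') : Nat) : Int)) := by
  intro cnt
  induction cnt with
  | zero =>
    intro r D
    simp [gridIns]
  | succ cnt ih =>
    intro r D
    set n := keys.length with hn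
    rw [List.range'_succ, List.foldl_cons]
    have hinner := innerLem keys g' g' 0 r D (by omega)
    rw [Nat.add_zero, ← List.range_eq_range'] at hinner
    rw [hinner]
    have e1 : min n (r * g' + g') = min n ((r + 1) * g') := by
      have : (r + 1) * g' = r * g' + g' := by ring
      omega
    rw [e1]
    have hih := ih (r + 1) (gridIns keys g' D (List.range' (min n (r * g')) (min n ((r + 1) * g') - min n (r * g'))))
    rw [hih]
    have e2 : (r + 1 + cnt) * g' = (r + (cnt + 1)) * g' := by ring
    rw [e2]
    have hmono1 : min n (r * g') ≤ min n ((r + 1) * g') := by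
      have : (r + 1) * g' = r * g' + g' := by ring
      omega
    have hmono2 : min n ((r + 1) * g') ≤ min n ((r + (cnt + 1)) * g') := by
      have ha : (r + 1) * g' = r * g' + g' := by ring
      have hb : (r + (cnt + 1)) * g' = r * g' + g' + cnt * g' := by ring
      omega
    rw [← range'_glue (min n (r * g')) (min n ((r + 1) * g')) (min n ((r + (cnt + 1)) * g')) hmono1 hmono2,
        gridIns_append]

lemma enum_map (keys : List String) :
    ∀ s : Nat, PySem.List.enumerate keys (s : Int) = (List.range keys.length).map (fun i => (((s + i : Nat) : Int), keys.getD i "")) := by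
  induction keys with
  | nil => intro s; simp [PySem.List.enumerate_nil]
  | cons x xs ih =>
    intro s
    rw [PySem.List.enumerate_cons]
    have hs : (s : Int) + 1 = ((s + 1 : Nat) : Int) := by push_cast; ring
    rw [hs, ih (s + 1)]
    simp only [List.length_cons, List.range_succ_eq_map, List.map_cons, List.map_map]
    refine List.cons_eq_cons.mpr ⟨by simp, ?_⟩
    apply List.map_congr_left
    intro i _
    simp [Function.comp]
    omega

-- ===== VERDICT (by name: the statement is the Claim_ definition above) =====
theorem calculate_grid_positions_spec : Claim_equal_calculate_grid_positions := by
  intro graph_dict G _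
  unfold Spec_calculate_grid_positions calculate_grid_positions calculate_grid_positions_alt
  set keys := PySem.List.dedup (graph_dict.map (·.1)) with hkeys
  by_cases h0 : keys.length = 0
  · simp [h0]
  · have hA : ¬ ((keys.length : Int) = 0) := by exact_mod_cast h0
    simp only [if_neg hA, if_neg h0]
    rw [PySem.List.pyRange_zero_nat (pyCeilSqrt keys.length)]
    simp only [List.foldl_map]
    have houter := outerLem keys (pyCeilSqrt keys.length) (pyCeilSqrt keys.length) 0
        (PySem.Dict.empty : PySem.Dict String (List (String × Int)))
    simp only [Nat.zero_mul, Nat.min_zero, Nat.cast_zero, Nat.zero_add] at houter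
    rw [← List.range_eq_range'] at houter
    rw [houter]
    have emin : min keys.length (pyCeilSqrt keys.length * pyCeilSqrt keys.length) = keys.length :=
      Nat.min_eq_left (le_pyCeilSqrt_sq keys.length)
    rw [emin, Nat.sub_zero, ← List.range_eq_range']
    dsimp only
    simp only [gridIns]
    rw [PySem.Dict.items_foldl_insert_fresh (List.range keys.length) (fun i => keys.getD i "")
        (gridVal (pyCeilSqrt keys.length)) _ (fun a _ => PySem.Dict.contains_empty _)
        (by rw [map_getD_range]; exact PySem.List.nodup_dedup _)]
    have he := enum_map keys 0
    simp only [Nat.cast_zero, Nat.zero_add] at he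
    rw [he, List.map_map]
    have hg : (((keys.length - 1).sqrt : Int) + 1) = ((pyCeilSqrt keys.length : Nat) : Int) := by
      rw [pyCeilSqrt_eq keys.length (by omega)]
      push_cast
      ring
    rw [hg]
    have hemp : (PySem.Dict.empty : PySem.Dict String (List (String × Int))).items = [] := rfl
    rw [hemp, List.nil_append]
    apply List.map_congr_left
    intro i _
    simp only [Function.comp, PySem.Int.mod_natCast, PySem.Int.floordiv_natCast, gridVal]
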